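-- pv_equiv track=rewrite | github.com/raeez/chiral-bar-cobar | compute/lib/bc_twisted_holography_deep_engine.py | _partitions_parts_ge2
-- ===== SOURCE A (Python) =====
-- def _partitions_parts_ge2(n: int) -> int:
--     """Number of partitions of n into parts >= 2.
--
--     This is the coefficient of q^n in prod_{k>=2} 1/(1-q^k).
--     Equivalently, p(n) - p(n-1) where p is the standard partition function.
--
--     Values: p_2(0)=1, p_2(1)=0, p_2(2)=1, p_2(3)=1, p_2(4)=2,
--             p_2(5)=2, p_2(6)=4, p_2(7)=4, p_2(8)=7.
--     """
--     if n < 0: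
--         return 0
--     # Dynamic programming
--     dp = [0] * (n + 1)
--     dp[0] = 1
--     for part in range(2, n + 1):
--         for j in range(part, n + 1):
--             dp[j] += dp[j - part]
--     return dp[n]
-- ===== SOURCE B (Python) =====
-- def _partitions_parts_ge2(n: int) -> int:
--     """Number of partitions of n into parts >= 2.
--
--     Counts by the number of parts: partitions of n into exactly a parts,
--     all >= 2, biject (subtract 1 from each part) with partitions of n - a
--     into exactly a parts, counted by the classical two-row recurrence
--     P(m, a) = P(m - 1, a - 1) + P(m - a, a).
--     """
--     if n < 0:
--         return 0
--     ans = 1 if n == 0 else 0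
--     prev = [1] + [0] * n            # P(m, 0)
--     for a in range(1, n // 2 + 1):  # a parts, each >= 2, need 2*a <= n
--         cur = [0] * (n + 1)         # P(m, a); zero for m < a
--         for m in range(a, n + 1):
--             cur[m] = prev[m - 1] + cur[m - a]
--         ans += cur[n - a]
--         prev = cur
--     return ans
-- ===== Notes on version B (the rewrite author's own statement) =====
-- stated objective: alternative
-- what changed: A fills one coefficient array with the Euler-product DP (one in-place pass per allowed part size 2..n); B instead counts by the number of parts, using the classical two-row recurrence P(m,a)=P(m-1,a-1)+P(m-a,a) for partitions into exactly a parts and summing the diagonal entries P(n-a,a) for a up to n//2.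
import Mathlib
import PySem

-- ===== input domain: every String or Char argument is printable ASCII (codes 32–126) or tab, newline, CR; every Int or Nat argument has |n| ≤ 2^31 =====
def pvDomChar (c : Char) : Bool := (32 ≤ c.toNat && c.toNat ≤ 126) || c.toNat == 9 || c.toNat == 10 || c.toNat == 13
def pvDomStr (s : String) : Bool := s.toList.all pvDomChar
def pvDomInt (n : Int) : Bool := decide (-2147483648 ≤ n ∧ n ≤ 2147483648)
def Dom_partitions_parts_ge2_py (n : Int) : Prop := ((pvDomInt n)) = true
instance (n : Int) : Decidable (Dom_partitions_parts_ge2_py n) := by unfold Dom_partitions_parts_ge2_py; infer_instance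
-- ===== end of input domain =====

-- B counts partitions by their NUMBER of parts (two-row recurrence, diagonal reads) instead of
-- A's one-array Euler-product DP over the allowed part sizes; alternative algorithm, same cost.

-- ===== PORT A =====
-- Python list reads/writes xs[i] are modelled on Array (hand-ported, exact for the
-- 0 <= i < len(xs) indices these loops produce; Python's list is an array with O(1) access)
def pvGetA (xs : Array Int) (i : Int) : Int := xs.getD i.toNat 0
def pvSetA (xs : Array Int) (i : Int) (v : Int) : Array Int := xs.setIfInBounds i.toNat v

def partitions_parts_ge2_py (n : Int) : Int :=
  if n < 0 then 0
  else
    -- dp = [0] * (n + 1); dp[0] = 1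
    let dp0 := pvSetA (Array.replicate (n + 1).toNat (0 : Int)) 0 1
    -- for part in range(2, n + 1): for j in range(part, n + 1): dp[j] += dp[j - part]
    let dp := (PySem.List.pyRange 2 (n + 1) 1).foldl (fun dp part =>
        (PySem.List.pyRange part (n + 1) 1).foldl (fun dp' j =>
          pvSetA dp' j (pvGetA dp' j + pvGetA dp' (j - part))) dp) dp0
    -- return dp[n]
    pvGetA dp n

-- ===== PORT B =====
def partitions_parts_ge2_py_alt (n : Int) : Int :=
  if n < 0 then 0
  else
    -- ans = 1 if n == 0 else 0; prev = [1] + [0] * n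
    let ans : Int := if n = 0 then 1 else 0
    let prev0 := ((1 : Int) :: List.replicate n.toNat (0 : Int)).toArray
    -- for a in range(1, n // 2 + 1): cur = [0]*(n+1); for m in range(a, n+1):
    --   cur[m] = prev[m-1] + cur[m-a]; ans += cur[n-a]; prev = cur
    let st := (PySem.List.pyRange 1 (PySem.Int.floordiv n 2 + 1) 1).foldl
      (fun (st : Int × Array Int) a =>
        let cur := (PySem.List.pyRange a (n + 1) 1).foldl
          (fun cur' m => pvSetA cur' m (pvGetA st.2 (m - 1) + pvGetA cur' (m - a)))
          (Array.replicate (n + 1).toNat (0 : Int))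
        (st.1 + pvGetA cur (n - a), cur))
      (ans, prev0)
    st.1

-- ===== PRECONDITION & SPEC =====
def Spec_partitions_parts_ge2_py (n : Int) (out : Int) : Prop := out = partitions_parts_ge2_py_alt n
instance (n : Int) (out : Int) : Decidable (Spec_partitions_parts_ge2_py n out) := by unfold Spec_partitions_parts_ge2_py; infer_instance

-- ===== CLAIM (what is proved, stated in full; the proofs are below) =====
def Claim_equal_partitions_parts_ge2_py : Prop := ∀ (n : Int), Dom_partitions_parts_ge2_py n → Spec_partitions_parts_ge2_py n (partitions_parts_ge2_py n)

-- ===== LEMMAS AND PROOFS =====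

-- pvG k p j = the coefficient DP value: partitions of j into parts in [k, p]
def pvG (k p j : Nat) : Int :=
  if _hpk : p < k then (if j = 0 then 1 else 0)
  else if _hp0 : p = 0 then (if j = 0 then 1 else 0)
  else pvG k (p - 1) j + (if _hpj : p ≤ j then pvG k p (j - p) else 0)
termination_by (p, j)
decreasing_by
  · exact Prod.Lex.left _ _ (by omega)
  · exact Prod.Lex.right _ (by omega)

-- pvF m k = partitions of m into parts >= k (smallest-part recurrence)
def pvF (m k : Nat) : Int :=
  if m = 0 then 1
  else if m < k then 0
  else if _hk0 : k = 0 then 0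
  else pvF (m - k) k + pvF m (k + 1)
termination_by (m, m + 1 - k)
decreasing_by
  · exact Prod.Lex.left _ _ (by omega)
  · exact Prod.Lex.right _ (by omega)

-- pvN k m a = partitions of m into exactly a parts, all >= k (B's recurrence)
def pvN (k m a : Nat) : Int :=
  if _ha : a = 0 then (if m = 0 then 1 else 0)
  else if _hmk : m < k then 0
  else if _hm0 : m = 0 then 0
  else pvN k (m - k) (a - 1) + pvN k (m - a) a
termination_by (a, m)
decreasing_by
  · exact Prod.Lex.left _ _ (by omega)
  · exact Prod.Lex.right _ (by omega)

lemma pvG_base (k p j : Nat) (h : p < k ∨ p = 0) : pvG k p j = if j = 0 then 1 else 0 := by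
  rw [pvG]; rcases h with h | h <;> simp [h]

lemma pvG_step (k p j : Nat) (hk : ¬ p < k) (h0 : p ≠ 0) :
    pvG k p j = pvG k (p - 1) j + (if p ≤ j then pvG k p (j - p) else 0) := by
  rw [pvG]; simp [hk, h0]

lemma pvG_lt (k p j : Nat) (hk : ¬ p < k) (h0 : p ≠ 0) (h : j < p) :
    pvG k p j = pvG k (p - 1) j := by
  rw [pvG_step k p j hk h0, if_neg (by omega)]; ring

lemma pvG_stab (k p j : Nat) (h : j ≤ p) : pvG k p j = pvG k j j := by
  induction p with
  | zero => rw [Nat.le_zero.mp h]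
  | succ p ih =>
    rcases Nat.eq_or_lt_of_le h with h' | h'
    · rw [h']
    · by_cases hk : p + 1 < k
      · rw [pvG_base k (p+1) j (Or.inl hk), pvG_base k j j (Or.inl (by omega))]
      · rw [pvG_lt k (p+1) j hk (by omega) (by omega)]
        simpa using ih (by omega)

lemma pvG_exchange (k p j : Nat) (hk : 1 ≤ k) :
    pvG k p j = pvG (k + 1) p j + (if k ≤ j ∧ k ≤ p then pvG k p (j - k) else 0) := by
  induction p using Nat.strong_induction_on generalizing j with
  | _ p ihp =>
  induction j using Nat.strong_induction_on with
  | _ j ihj =>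
  by_cases hpk : p < k
  · rw [pvG_base k p j (Or.inl hpk), pvG_base (k+1) p j (Or.inl (by omega)),
      if_neg (show ¬ (k ≤ j ∧ k ≤ p) by omega)]
    ring
  · by_cases hpk2 : p = k
    · subst hpk2
      rw [pvG_step p p j (by omega) (by omega),
        pvG_base p (p-1) j (Or.inl (by omega)),
        pvG_base (p+1) p j (Or.inl (by omega))]
      by_cases hpj : p ≤ j
      · rw [if_pos hpj, if_pos (show p ≤ j ∧ p ≤ p by omega)]
      · rw [if_neg hpj, if_neg (show ¬ (p ≤ j ∧ p ≤ p) by omega)]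
    · -- k < p
      rw [pvG_step k p j (by omega) (by omega),
        ihp (p-1) (by omega) j,
        pvG_step (k+1) p j (by omega) (by omega)]
      by_cases hkj : k ≤ j
      · rw [if_pos (⟨hkj, by omega⟩ : k ≤ j ∧ k ≤ p),
          pvG_step k p (j-k) (by omega) (by omega)]
        by_cases hpj : p ≤ j
        · rw [if_pos hpj, ihj (j-p) (by omega)]
          by_cases hpkj : p + k ≤ j
          · rw [if_pos (show k ≤ j - p ∧ k ≤ p by omega),
              if_pos (show p ≤ j - k by omega),
              if_pos (show k ≤ j ∧ k ≤ p - 1 by omega)]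
            have e : j - p - k = j - k - p := by omega
            rw [e, if_pos hpj]; ring
          · rw [if_neg (show ¬ (k ≤ j - p ∧ k ≤ p) by omega),
              if_neg (show ¬ p ≤ j - k by omega),
              if_pos (show k ≤ j ∧ k ≤ p - 1 by omega), if_pos hpj]
            ring
        · rw [if_neg hpj, if_neg (show ¬ p ≤ j - k by omega),
            if_pos (show k ≤ j ∧ k ≤ p - 1 by omega), if_neg hpj]
          ring
      · rw [if_neg (show ¬ (k ≤ j ∧ k ≤ p) by omega),
          if_neg (show ¬ (k ≤ j ∧ k ≤ p - 1) by omega),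
          if_neg (show ¬ p ≤ j by omega), if_neg (show ¬ p ≤ j by omega)]

lemma pvF_eq_pvG (m k : Nat) (hk : 1 ≤ k) : pvF m k = pvG k m m := by
  induction m using Nat.strong_induction_on generalizing k with
  | _ m ihm =>
  -- inner induction on the gap m + 1 - k
  induction hg : m + 1 - k using Nat.strong_induction_on generalizing k with
  | _ g ihg =>
  rw [pvF]
  by_cases hm0 : m = 0
  · subst hm0
    rw [pvG_base k 0 0 (Or.inr rfl)]
    simp
  · by_cases hmk : m < k
    · rw [pvG_base k m m (Or.inl hmk)]
      simp [hm0, hmk]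
    · simp only [hm0, hmk, if_false, dif_neg (show ¬ k = 0 by omega)]
      have h1 : pvF (m - k) k = pvG k (m - k) (m - k) := ihm (m - k) (by omega) k hk
      have h2 : pvF m (k + 1) = pvG (k + 1) m m := by
        by_cases hk1 : m < k + 1
        · rw [pvF, pvG_base (k+1) m m (Or.inl hk1)]
          simp [hm0, hk1]
        · exact ihg (m + 1 - (k + 1)) (by omega) (k + 1) (by omega) rfl
      rw [h1, h2]
      rw [pvG_exchange k m m hk, if_pos ⟨show k ≤ m by omega, show k ≤ m by omega⟩,
        pvG_stab k m (m - k) (by omega)]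
      ring

lemma pvN_zero_right (k m : Nat) (hm : m ≠ 0) : pvN k m 0 = 0 := by
  rw [pvN]; simp [hm]

lemma pvN_step (k m a : Nat) (ha : ¬ a = 0) (hmk : ¬ m < k) (hm0 : ¬ m = 0) :
    pvN k m a = pvN k (m - k) (a - 1) + pvN k (m - a) a := by
  rw [pvN]; simp only [dif_neg ha, dif_neg hmk, dif_neg hm0]

lemma pvN_vanish (k m a : Nat) (ha : 1 ≤ a) (h : m < k * a) : pvN k m a = 0 := by
  induction a using Nat.strong_induction_on generalizing m with
  | _ a iha =>
  induction m using Nat.strong_induction_on with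
  | _ m ihm =>
  rw [pvN]
  have hk : 1 ≤ k := by
    rcases Nat.eq_zero_or_pos k with h0 | h1
    · subst h0; simp at h
    · exact h1
  by_cases hmk : m < k
  · simp [show ¬ a = 0 by omega, hmk]
  · have hm0 : ¬ m = 0 := by omega
    have hka : k * (a - 1) + k = k * a := by
      cases a with
      | zero => omega
      | succ a' => simp [Nat.mul_succ]
    have ha2 : 2 ≤ a := by
      by_contra hc
      have : a = 1 := by omega
      subst this
      simp at h
      omega
    have h1 : pvN k (m - k) (a - 1) = 0 :=
      iha (a - 1) (by omega) (m - k) (by omega) (by omega)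
    have h2 : pvN k (m - a) a = 0 := ihm (m - a) (by omega) (by omega)
    simp only [dif_neg (show ¬ a = 0 by omega), dif_neg hmk, dif_neg hm0, h1, h2]
    ring

lemma pvN_shift (k m a : Nat) (hk : 1 ≤ k) : pvN (k + 1) m a = pvN k (m - a) a := by
  induction a using Nat.strong_induction_on generalizing m with
  | _ a iha =>
  induction m using Nat.strong_induction_on with
  | _ m ihm =>
  by_cases ha : a = 0
  · subst ha
    rw [Nat.sub_zero, pvN]
    conv_rhs => rw [pvN]
    simp
  · by_cases hmk : m < k + 1
    · have hL : pvN (k + 1) m a = 0 := by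
        rw [pvN]; simp [ha, hmk]
      have hR : pvN k (m - a) a = 0 := by
        rw [pvN]
        rcases (show m - a < k ∨ (¬ m - a < k ∧ m - a = 0) by omega) with hc | ⟨hc1, hc2⟩
        · simp [ha, hc]
        · simp [ha, hc2]
      rw [hL, hR]
    · -- m ≥ k + 1, a ≥ 1
      rw [pvN]
      simp only [dif_neg ha, dif_neg hmk, dif_neg (show ¬ m = 0 by omega)]
      by_cases hma : m - a < k
      · -- here m < k + a, so a ≥ 2 and both summands vanish
        have ha2 : 2 ≤ a := by omega
        have v1 : pvN (k + 1) (m - (k + 1)) (a - 1) = 0 :=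
          pvN_vanish (k + 1) (m - (k + 1)) (a - 1) (by omega)
            (lt_of_lt_of_le (show m - (k + 1) < a - 1 by omega)
              (Nat.le_mul_of_pos_left _ (by omega)))
        have v2 : pvN (k + 1) (m - a) a = 0 :=
          pvN_vanish (k + 1) (m - a) a (by omega)
            (lt_of_lt_of_le (show m - a < k + 1 by omega)
              (Nat.le_mul_of_pos_right _ (by omega)))
        have hR : pvN k (m - a) a = 0 := by
          rw [pvN]; simp [ha, hma]
        rw [v1, v2, hR]; ring
      · -- m - a ≥ k : both sides unfold to the same two summands
        rw [iha (a - 1) (by omega) (m - (k + 1)), ihm (m - a) (by omega)]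
        rw [show pvN k (m - a) a = pvN k (m - a - k) (a - 1) + pvN k (m - a - a) a from by
          rw [pvN]
          simp only [dif_neg ha, dif_neg (show ¬ m - a < k by omega),
            dif_neg (show ¬ m - a = 0 by omega)]]
        rw [show m - (k + 1) - (a - 1) = m - a - k from by omega]

lemma sum_pvN_zero (k m : Nat) (hm : m ≠ 0) (hmk : m < k) (r : Nat) :
    ∑ a ∈ Finset.range r, pvN k m a = 0 := by
  refine Finset.sum_eq_zero fun a _ => ?_
  by_cases ha : a = 0
  · subst ha; exact pvN_zero_right k m hm
  · rw [pvN]; simp [ha, hmk]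

lemma pvF_sum (m k : Nat) (hk : 1 ≤ k) :
    pvF m k = ∑ a ∈ Finset.range (m + 1), pvN k m a := by
  induction m using Nat.strong_induction_on generalizing k with
  | _ m ihm =>
  induction hg : m + 1 - k using Nat.strong_induction_on generalizing k with
  | _ g ihg =>
  rw [pvF]
  by_cases hm0 : m = 0
  · subst hm0
    rw [Finset.sum_range_one, pvN]
    simp
  · by_cases hmk : m < k
    · rw [sum_pvN_zero k m hm0 hmk]
      simp [hm0, hmk]
    · simp only [hm0, hmk, if_false, dif_neg (show ¬ k = 0 by omega)]
      have h1 : pvF (m - k) k = ∑ a ∈ Finset.range (m - k + 1), pvN k (m - k) a :=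
        ihm (m - k) (by omega) k hk
      have h2 : pvF m (k + 1) = ∑ a ∈ Finset.range (m + 1), pvN (k + 1) m a := by
        by_cases hk1 : m < k + 1
        · rw [pvF, sum_pvN_zero (k+1) m hm0 hk1]
          simp [hm0, hk1]
        · exact ihg (m + 1 - (k + 1)) (by omega) (k + 1) (by omega) rfl
      rw [h1, h2]
      -- rewrite the (k+1)-sum through the shift bijection
      have h3 : ∑ a ∈ Finset.range (m + 1), pvN (k + 1) m a
          = ∑ a ∈ Finset.range m, pvN k (m - (a + 1)) (a + 1) := by
        rw [Finset.sum_range_succ']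
        simp only [fun a => pvN_shift k m a hk]
        rw [Nat.sub_zero, pvN_zero_right k m hm0, add_zero]
      -- extend the (m-k)-sum to range m by vanishing terms
      have h4 : ∑ a ∈ Finset.range (m - k + 1), pvN k (m - k) a
          = ∑ a ∈ Finset.range m, pvN k (m - k) a := by
        refine Finset.sum_subset (fun x hx => ?_) ?_
        · rw [Finset.mem_range] at hx ⊢
          omega
        intro a _ ha
        rw [Finset.mem_range, Nat.not_lt] at ha
        exact pvN_vanish k (m - k) a (by omega)
          (lt_of_lt_of_le (show m - k < a by omega) (Nat.le_mul_of_pos_left _ (by omega)))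
      rw [h3, h4]
      -- expand the target sum one step and unfold pvN at successor indices
      rw [Finset.sum_range_succ', pvN_zero_right k m hm0, add_zero]
      have h5 : ∀ a ∈ Finset.range m, pvN k m (a + 1)
          = pvN k (m - k) a + pvN k (m - (a + 1)) (a + 1) := by
        intro a _
        rw [pvN]
        simp only [dif_neg (show ¬ a + 1 = 0 by omega), dif_neg hmk, dif_neg hm0,
          Nat.add_sub_cancel]
      rw [Finset.sum_congr rfl h5, Finset.sum_add_distrib]

lemma sum_half (N : Nat) :
    ∑ b ∈ Finset.range (N / 2 + 1), pvN 2 N b = ∑ b ∈ Finset.range (N + 1), pvN 2 N b := by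
  refine Finset.sum_subset (fun x hx => ?_) (fun b _ hb => ?_)
  · rw [Finset.mem_range] at hx ⊢
    omega
  · rw [Finset.mem_range] at hb
    exact pvN_vanish 2 N b (by omega) (by omega)

-- ===== loop invariants =====

lemma pyGetD_set_int (xs : List Int) (j v i : Int) (hj0 : 0 ≤ j) (hjl : j < xs.length)
    (hi0 : 0 ≤ i) (hil : i < xs.length) :
    PySem.List.pyGetD (PySem.List.pySetD xs j v) i 0
      = if i = j then v else PySem.List.pyGetD xs i 0 := by
  rw [PySem.List.pySetD_of_nonneg xs v hj0,
    PySem.List.pyGetD_eq_getElem _ 0 hi0 (by simpa using hil)]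
  by_cases h : i = j
  · subst h
    rw [if_pos rfl, List.getElem_set_self]
  · rw [if_neg h, List.getElem_set_ne (show j.toNat ≠ i.toNat from by omega) ,
      ← PySem.List.pyGetD_eq_getElem xs 0 hi0 hil]

lemma pvGetA_eq_pyGetD (xs : Array Int) (i : Int) (hi : 0 ≤ i) (hil : i < (xs.size : Int)) :
    pvGetA xs i = PySem.List.pyGetD xs.toList i 0 := by
  rw [PySem.List.pyGetD_eq_getElem _ 0 hi (by simpa using hil)]
  simp [pvGetA, Array.getD, show i.toNat < xs.size by omega]

lemma toList_pvSetA (xs : Array Int) (j v : Int) (hj : 0 ≤ j) :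
    (pvSetA xs j v).toList = PySem.List.pySetD xs.toList j v := by
  rw [PySem.List.pySetD_of_nonneg _ _ hj]
  simp [pvSetA, Array.toList_setIfInBounds]

lemma size_pvSetA (xs : Array Int) (j v : Int) : (pvSetA xs j v).size = xs.size := by
  simp [pvSetA]

lemma pvGetA_set (xs : Array Int) (j v i : Int) (hj0 : 0 ≤ j) (hjl : j < (xs.size : Int))
    (hi0 : 0 ≤ i) (hil : i < (xs.size : Int)) :
    pvGetA (pvSetA xs j v) i = if i = j then v else pvGetA xs i := by
  rw [pvGetA_eq_pyGetD _ i hi0 (by rw [size_pvSetA]; omega),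
    toList_pvSetA xs j v hj0,
    pyGetD_set_int xs.toList j v i hj0 (by simpa using hjl) hi0 (by simpa using hil),
    ← pvGetA_eq_pyGetD xs i hi0 hil]

lemma pvGetA_replicate (N : Nat) (i : Int) (hi0 : 0 ≤ i) (hil : i < (N : Int)) :
    pvGetA (Array.replicate N (0 : Int)) i = 0 := by
  rw [pvGetA_eq_pyGetD _ i hi0 (by simpa using hil),
    PySem.List.pyGetD_eq_getElem _ 0 hi0 (by simpa using hil)]
  simp

lemma portA_inner (n p : Int) (hp2 : 2 ≤ p) (hpn : p ≤ n) :
    ∀ (c : Nat) (t : Int), t = n + 1 - (c : Int) → p ≤ t → ∀ (dp : Array Int),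
      dp.size = (n + 1).toNat →
      (∀ i : Int, 0 ≤ i → i ≤ n → pvGetA dp i
          = (if i < t then pvG 2 p.toNat i.toNat else pvG 2 (p.toNat - 1) i.toNat)) →
      (((PySem.List.pyRange t (n + 1) 1).foldl (fun dp' j =>
          pvSetA dp' j (pvGetA dp' j + pvGetA dp' (j - p))) dp).size = (n + 1).toNat
      ∧ ∀ i : Int, 0 ≤ i → i ≤ n →
        pvGetA ((PySem.List.pyRange t (n + 1) 1).foldl (fun dp' j =>
          pvSetA dp' j (pvGetA dp' j + pvGetA dp' (j - p))) dp) i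
          = pvG 2 p.toNat i.toNat) := by
  intro c
  induction c with
  | zero =>
    intro t ht hpt dp hlen hdp
    rw [ht, PySem.List.pyRange_one_eq_nil (by omega), List.foldl_nil]
    exact ⟨hlen, fun i hi0 hin => by rw [hdp i hi0 hin, if_pos (by omega)]⟩
  | succ c ih =>
    intro t ht hpt dp hlen hdp
    rw [PySem.List.pyRange_one_cons (by omega), List.foldl_cons]
    refine ih (t + 1) (by omega) (by omega) _ (by rw [size_pvSetA]; exact hlen)
      (fun i' hi0 hin => ?_)
    rw [pvGetA_set dp t _ i' (by omega) (by rw [hlen]; omega) hi0 (by rw [hlen]; omega)]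
    by_cases hit : i' = t
    · subst hit
      rw [if_pos rfl, if_pos (by omega),
        hdp i' (by omega) (by omega), hdp (i' - p) (by omega) (by omega),
        if_neg (show ¬ i' < i' by omega), if_pos (show i' - p < i' by omega)]
      rw [pvG_step 2 p.toNat i'.toNat (by omega) (by omega),
        if_pos (show p.toNat ≤ i'.toNat by omega),
        show (i' - p).toNat = i'.toNat - p.toNat by omega]
    · rw [if_neg hit, hdp i' hi0 hin]
      by_cases h2 : i' < t
      · rw [if_pos h2, if_pos (by omega)]
      · rw [if_neg h2, if_neg (by omega)]

lemma portA_outer (n : Int) (hn : 0 ≤ n) :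
    ∀ (c : Nat) (t : Int), t = n + 1 - (c : Int) → 2 ≤ t → ∀ (dp : Array Int),
      dp.size = (n + 1).toNat →
      (∀ i : Int, 0 ≤ i → i ≤ n → pvGetA dp i = pvG 2 (t - 1).toNat i.toNat) →
      ∀ i : Int, 0 ≤ i → i ≤ n →
        pvGetA ((PySem.List.pyRange t (n + 1) 1).foldl (fun dp part =>
          (PySem.List.pyRange part (n + 1) 1).foldl (fun dp' j =>
            pvSetA dp' j (pvGetA dp' j + pvGetA dp' (j - part))) dp) dp) i
          = pvG 2 n.toNat i.toNat := by
  intro c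
  induction c with
  | zero =>
    intro t ht h2t dp hlen hdp i hi0 hin
    rw [ht, PySem.List.pyRange_one_eq_nil (by omega), List.foldl_nil, hdp i hi0 hin,
      show (t - 1).toNat = n.toNat by omega]
  | succ c ih =>
    intro t ht h2t dp hlen hdp i hi0 hin
    rw [PySem.List.pyRange_one_cons (by omega), List.foldl_cons]
    have hstep := portA_inner n t h2t (by omega) (c + 1) t (by omega) (le_refl t) dp hlen
      (fun i' hi0' hin' => by
        rw [hdp i' hi0' hin']
        by_cases h2 : i' < t
        · rw [if_pos h2, show (t - 1).toNat = t.toNat - 1 by omega,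
            ← pvG_lt 2 t.toNat i'.toNat (by omega) (by omega) (by omega)]
        · rw [if_neg h2, show (t - 1).toNat = t.toNat - 1 by omega])
    exact ih (t + 1) (by omega) (by omega) _ hstep.1
      (fun i' hi0' hin' => by
        rw [hstep.2 i' hi0' hin', show (t + 1 - 1).toNat = t.toNat by omega])
      i hi0 hin

lemma portA_eq (n : Int) (hn : 0 ≤ n) :
    partitions_parts_ge2_py n = pvG 2 n.toNat n.toNat := by
  simp only [partitions_parts_ge2_py, if_neg (show ¬ n < 0 by omega)]
  have hdp0 : ∀ i : Int, 0 ≤ i → i ≤ n →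
      pvGetA (pvSetA (Array.replicate (n + 1).toNat (0 : Int)) 0 1) i
        = pvG 2 ((2 : Int) - 1).toNat i.toNat := by
    intro i hi0 hin
    rw [pvGetA_set _ 0 1 i (le_refl 0) (by simp; omega) hi0 (by simp; omega),
      pvG_base 2 ((2 : Int) - 1).toNat i.toNat (Or.inl (by omega))]
    by_cases h : i = 0
    · rw [if_pos h, if_pos (by omega)]
    · rw [if_neg h, if_neg (by omega), pvGetA_replicate _ i hi0 (by simp; omega)]
  by_cases hn0 : n = 0
  · subst hn0
    rw [PySem.List.pyRange_one_eq_nil (by omega), List.foldl_nil]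
    have := hdp0 0 (le_refl 0) (le_refl 0)
    rw [this, pvG_base 2 ((2 : Int) - 1).toNat (Int.toNat 0) (Or.inl (by omega)),
      pvG_base 2 (Int.toNat 0) (Int.toNat 0) (Or.inr (by omega))]
  · exact portA_outer n hn (n - 1).toNat 2 (by omega) (by omega) _
      (by rw [size_pvSetA]; simp) hdp0 n hn (le_refl n)

lemma portB_inner (n a : Int) (ha1 : 1 ≤ a) (han : a ≤ n) (prev : Array Int)
    (hprev : ∀ i : Int, 0 ≤ i → i ≤ n → pvGetA prev i = pvN 1 i.toNat (a.toNat - 1)) :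
    ∀ (c : Nat) (t : Int), t = n + 1 - (c : Int) → a ≤ t → ∀ (cur : Array Int),
      cur.size = (n + 1).toNat →
      (∀ i : Int, 0 ≤ i → i ≤ n → pvGetA cur i
          = (if i < t then pvN 1 i.toNat a.toNat else 0)) →
      (((PySem.List.pyRange t (n + 1) 1).foldl (fun cur' m =>
          pvSetA cur' m (pvGetA prev (m - 1) + pvGetA cur' (m - a))) cur).size
        = (n + 1).toNat
      ∧ ∀ i : Int, 0 ≤ i → i ≤ n →
        pvGetA ((PySem.List.pyRange t (n + 1) 1).foldl (fun cur' m =>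
          pvSetA cur' m (pvGetA prev (m - 1) + pvGetA cur' (m - a))) cur) i
          = pvN 1 i.toNat a.toNat) := by
  intro c
  induction c with
  | zero =>
    intro t ht hat cur hlen hcur
    rw [ht, PySem.List.pyRange_one_eq_nil (by omega), List.foldl_nil]
    exact ⟨hlen, fun i hi0 hin => by rw [hcur i hi0 hin, if_pos (by omega)]⟩
  | succ c ih =>
    intro t ht hat cur hlen hcur
    rw [PySem.List.pyRange_one_cons (by omega), List.foldl_cons]
    refine ih (t + 1) (by omega) (by omega) _ (by rw [size_pvSetA]; exact hlen)
      (fun i' hi0 hin => ?_)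
    rw [pvGetA_set cur t _ i' (by omega) (by rw [hlen]; omega) hi0 (by rw [hlen]; omega)]
    by_cases hit : i' = t
    · subst hit
      rw [if_pos rfl, if_pos (by omega),
        hprev (i' - 1) (by omega) (by omega), hcur (i' - a) (by omega) (by omega),
        if_pos (show i' - a < i' by omega),
        pvN_step 1 i'.toNat a.toNat (by omega) (by omega) (by omega),
        show (i' - 1).toNat = i'.toNat - 1 by omega,
        show (i' - a).toNat = i'.toNat - a.toNat by omega]
    · rw [if_neg hit, hcur i' hi0 hin]
      by_cases h2 : i' < t
      · rw [if_pos h2, if_pos (by omega)]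
      · rw [if_neg h2, if_neg (by omega)]

lemma portB_outer (n : Int) (hn : 0 ≤ n) :
    ∀ (c : Nat) (t : Int), t = PySem.Int.floordiv n 2 + 1 - (c : Int) → 1 ≤ t →
      ∀ (st : Int × Array Int),
      st.1 = ∑ b ∈ Finset.range ((t - 1).toNat + 1), pvN 2 n.toNat b →
      (∀ i : Int, 0 ≤ i → i ≤ n → pvGetA st.2 i = pvN 1 i.toNat (t - 1).toNat) →
      ((PySem.List.pyRange t (PySem.Int.floordiv n 2 + 1) 1).foldl
        (fun (st : Int × Array Int) a =>
          let cur := (PySem.List.pyRange a (n + 1) 1).foldl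
            (fun cur' m => pvSetA cur' m (pvGetA st.2 (m - 1) + pvGetA cur' (m - a)))
            (Array.replicate (n + 1).toNat (0 : Int))
          (st.1 + pvGetA cur (n - a), cur))
        st).1 = ∑ b ∈ Finset.range (n.toNat / 2 + 1), pvN 2 n.toNat b := by
  have hfd : PySem.Int.floordiv n 2 = n / 2 := PySem.Int.floordiv_eq_ediv_of_pos (by omega)
  intro c
  induction c with
  | zero =>
    intro t ht h1t st hans hprev
    rw [hfd] at ht
    rw [ht, hfd, PySem.List.pyRange_one_eq_nil (by omega), List.foldl_nil, hans,
      show (t - 1).toNat + 1 = n.toNat / 2 + 1 by omega]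
  | succ c ih =>
    intro t ht h1t st hans hprev
    rw [hfd] at ht
    have htn : 2 * t ≤ n := by omega
    have hcur := portB_inner n t (by omega) (by omega) st.2
      (fun i hi0 hin => by
        rw [hprev i hi0 hin, show (t - 1).toNat = t.toNat - 1 by omega])
      (n + 1 - t).toNat t (by omega) (le_refl t) (Array.replicate (n + 1).toNat (0 : Int))
      (by simp)
      (fun i hi0 hin => by
        rw [pvGetA_replicate _ i hi0 (by simp; omega)]
        by_cases h1 : i < t
        · rw [if_pos h1, pvN_vanish 1 i.toNat t.toNat (by omega) (by omega)]
        · rw [if_neg h1])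
    rw [hfd, PySem.List.pyRange_one_cons (by omega), List.foldl_cons]
    have hmain := ih (t + 1) (by rw [hfd]; omega) (by omega)
    rw [hfd] at hmain
    refine hmain _ ?_ ?_
    · dsimp only
      rw [show (t - 1).toNat + 1 = t.toNat by omega] at hans
      rw [hcur.2 (n - t) (by omega) (by omega), hans]
      have hshift : pvN 1 (n - t).toNat t.toNat = pvN 2 n.toNat t.toNat := by
        rw [show (2 : Nat) = 1 + 1 from rfl, pvN_shift 1 n.toNat t.toNat (le_refl 1),
          show n.toNat - t.toNat = (n - t).toNat by omega]
      rw [hshift, show (t + 1 - 1).toNat + 1 = t.toNat + 1 by omega,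
        Finset.sum_range_succ]
    · intro i hi0 hin
      dsimp only
      rw [hcur.2 i hi0 hin, show (t + 1 - 1).toNat = t.toNat by omega]

lemma portB_eq (n : Int) (hn : 0 ≤ n) :
    partitions_parts_ge2_py_alt n = ∑ b ∈ Finset.range (n.toNat / 2 + 1), pvN 2 n.toNat b := by
  have hfd : PySem.Int.floordiv n 2 = n / 2 := PySem.Int.floordiv_eq_ediv_of_pos (by omega)
  simp only [partitions_parts_ge2_py_alt, if_neg (show ¬ n < 0 by omega)]
  refine portB_outer n hn (PySem.Int.floordiv n 2).toNat 1 (by rw [hfd]; omega) (by omega)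
    (if n = 0 then 1 else 0, ((1 : Int) :: List.replicate n.toNat (0 : Int)).toArray) ?_ ?_
  · show (if n = 0 then (1 : Int) else 0) = _
    rw [show ((1 : Int) - 1).toNat + 1 = 1 from rfl, Finset.sum_range_one, pvN]
    split_ifs <;> first | rfl | omega
  · intro i hi0 hin
    show pvGetA ((1 : Int) :: List.replicate n.toNat (0 : Int)).toArray i = _
    rw [pvGetA_eq_pyGetD _ i hi0 (by simp; omega), List.toList_toArray,
      show ((1 : Int) - 1).toNat = 0 from rfl,
      PySem.List.pyGetD_eq_getElem _ 0 hi0 (by simp; omega)]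
    by_cases h : i = 0
    · subst h
      rw [pvN]
      simp
    · rw [List.getElem_cons, dif_neg (show ¬ i.toNat = 0 by omega),
        List.getElem_replicate, pvN]
      simp [show ¬ i.toNat = 0 by omega]

-- ===== VERDICT (by name: the statement is the Claim_ definition above) =====
theorem partitions_parts_ge2_py_spec : Claim_equal_partitions_parts_ge2_py := by
  intro n _
  unfold Spec_partitions_parts_ge2_py
  by_cases hn : n < 0
  · simp [partitions_parts_ge2_py, partitions_parts_ge2_py_alt, hn]
  · rw [Int.not_lt] at hn
    rw [portA_eq n hn, portB_eq n hn, sum_half, ← pvF_sum _ 2 (by omega),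
      pvF_eq_pvG _ 2 (by omega)]
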